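-- pv_equiv track=rewrite | github.com/alexspetty/nfield | experiments/lag_signature.py | collision_at_lag
-- ===== SOURCE A (Python) =====
-- import math
--
-- b = 10
--
-- def collision_at_lag(n, ell):
--     """S_ell(n) = C(b^ell mod n) - floor((n-1)/b^ell)"""
--     if n <= 1:
--         return 0
--     g = pow(b, ell, n)
--     C = 0
--     bl = b ** ell
--     for r in range(1, n):
--         if math.gcd(r, n) != 1:
--             continue
--         d1 = bl * r // n
--         gr = g * r % n
--         d2 = bl * gr // n
--         if d1 == d2:
--             C += 1
--     Q = (n - 1) // bl if bl <= n else 0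
--     return C - Q
-- ===== SOURCE B (Python) =====
-- import math
--
-- b = 10
--
-- def collision_at_lag(n, ell):
--     """Analytic shortcut: once b**ell >= n, a coprime r collides iff g*r % n == r,
--     which happens for some (then every) coprime r exactly when b**ell % n == 1."""
--     if n <= 1:
--         return 0
--     p = 1                       # p tracks b**e, capped as soon as it reaches n
--     e = 0
--     while e < ell and p < n:
--         p *= b
--         e += 1
--     if p >= n:                  # b**ell >= n: result is phi(n) if b**ell % n == 1 else 0
--         if pow(b, ell, n) != 1:
--             return 0
--         return sum(1 for r in range(1, n) if math.gcd(r, n) == 1)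
--     bl = p                      # exact small power b**ell < n
--     g = bl % n
--     total = 0
--     for r in range(1, n):
--         if math.gcd(r, n) == 1 and bl * r // n == bl * (g * r % n) // n:
--             total += 1
--     return total - (n - 1) // bl
-- ===== Notes on version B (the rewrite author's own statement) =====
-- stated objective: faster
-- what changed: When b**ell >= n the loop is replaced by the closed form phi(n)*[b**ell mod n == 1] (the floor-division collision forces g*r%n==r there), computed with pow(b,ell,n) and never materializing the huge integer b**ell; the O(n) loop survives only when b**ell < n, where all arithmetic is machine-sized.
-- outside the precondition, e.g. on collision_at_lag(3, -1): A returns -17.0, B returns 0; on collision_at_lag(15, -1): A raises ValueError, B returns -6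
import Mathlib
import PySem

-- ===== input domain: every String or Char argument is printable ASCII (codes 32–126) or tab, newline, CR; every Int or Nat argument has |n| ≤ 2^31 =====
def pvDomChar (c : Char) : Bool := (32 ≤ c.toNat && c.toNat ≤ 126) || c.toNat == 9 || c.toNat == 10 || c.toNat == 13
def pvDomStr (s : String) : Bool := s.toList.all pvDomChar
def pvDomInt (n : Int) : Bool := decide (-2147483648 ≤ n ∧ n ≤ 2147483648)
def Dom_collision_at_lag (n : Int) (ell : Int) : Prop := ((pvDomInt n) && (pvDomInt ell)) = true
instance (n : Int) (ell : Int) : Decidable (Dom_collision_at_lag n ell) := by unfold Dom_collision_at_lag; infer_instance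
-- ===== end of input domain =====

-- B replaces the O(n·ell) big-integer loop by the closed form φ(n)·[b^ell ≡ 1 mod n]
-- whenever b^ell ≥ n (measured faster, asymptotically); return values agree on all ell ≥ 0.


-- ===== PORT A =====
-- literal transliteration of Source A (b = 10; the r-loop is a foldl over range(1, n))
def collision_at_lag (n : Int) (ell : Int) : Int :=
  if n ≤ 1 then 0
  else
    let g := PySem.Int.powMod 10 ell.toNat n       -- pow(b, ell, n), ell ≥ 0 under Pre_
    let bl : Int := 10 ^ ell.toNat                 -- b ** ell
    let C := (PySem.List.pyRange 1 n 1).foldl (fun C r =>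
      if Int.gcd r n ≠ 1 then C
      else
        let d1 := PySem.Int.floordiv (bl * r) n
        let gr := PySem.Int.mod (g * r) n
        let d2 := PySem.Int.floordiv (bl * gr) n
        if d1 = d2 then C + 1 else C) 0
    let Q := if bl ≤ n then PySem.Int.floordiv (n - 1) bl else 0
    C - Q

-- ===== PORT B =====
-- the 'while e < ell and p < n: p *= b; e += 1' loop of Source B (p caps at the first value ≥ n)
def pvCap (n : Int) : Nat → Int
  | 0 => 1
  | e + 1 => let p := pvCap n e; if p < n then p * 10 else p

-- literal transliteration of Source B
def collision_at_lag_alt (n : Int) (ell : Int) : Int :=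
  if n ≤ 1 then 0
  else
    let p := pvCap n ell.toNat
    if p ≥ n then
      if PySem.Int.powMod 10 ell.toNat n ≠ 1 then 0
      else ((PySem.List.pyRange 1 n 1).filter (fun r => Int.gcd r n == 1)).length
    else
      let bl := p
      let g := PySem.Int.mod bl n
      let total := (PySem.List.pyRange 1 n 1).foldl (fun t r =>
        if Int.gcd r n = 1 ∧ PySem.Int.floordiv (bl * r) n
            = PySem.Int.floordiv (bl * (PySem.Int.mod (g * r) n)) n
        then t + 1 else t) 0
      total - PySem.Int.floordiv (n - 1) bl

-- ===== PRECONDITION & SPEC =====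
-- Pre_ excludes ell < 0, where Python A either raises ValueError (pow with non-invertible
-- base) or returns a float (b ** ell is a float), never an int.
def Pre_collision_at_lag (n : Int) (ell : Int) : Prop := 0 ≤ ell ∨ n ≤ 1
instance (n : Int) (ell : Int) : Decidable (Pre_collision_at_lag n ell) := by unfold Pre_collision_at_lag; infer_instance
def pvWitness_collision_at_lag : Int × Int := (12, 2)

def Spec_collision_at_lag (n : Int) (ell : Int) (out : Int) : Prop := out = collision_at_lag_alt n ell
instance (n : Int) (ell : Int) (out : Int) : Decidable (Spec_collision_at_lag n ell out) := by unfold Spec_collision_at_lag; infer_instance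

-- ===== CLAIM (what is proved, stated in full; the proofs are below) =====
def Claim_equal_collision_at_lag : Prop := ∀ (n : Int) (ell : Int), Dom_collision_at_lag n ell → Pre_collision_at_lag n ell → Spec_collision_at_lag n ell (collision_at_lag n ell)

-- ===== LEMMAS AND PROOFS =====

theorem pvCap_le (n : Int) (hn : 1 < n) : ∀ e : Nat, pvCap n e ≤ 10 ^ e := by
  intro e
  induction e with
  | zero => simp [pvCap]
  | succ e ih =>
    simp only [pvCap, pow_succ]
    split
    · omega
    · nlinarith [pow_pos (by norm_num : (0:Int) < 10) e]

theorem pvCap_eq_of_lt (n : Int) : ∀ e : Nat, pvCap n e < n → pvCap n e = 10 ^ e := by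
  intro e
  induction e with
  | zero => simp [pvCap]
  | succ e ih =>
    intro h
    simp only [pvCap] at h ⊢
    by_cases c : pvCap n e < n
    · have hc := ih c
      rw [if_pos c] at h ⊢
      rw [hc, pow_succ]
    · rw [if_neg c] at h
      exact absurd h c

-- the collision test of the loop body, in the regime b^ell >= n: it holds iff g = 1
theorem pvCollide_iff (n bl r : Int) (hn : 1 < n) (hbl : n ≤ bl)
    (hr1 : 1 ≤ r) (hrn : r < n) (hco : Int.gcd r n = 1) :
    (PySem.Int.floordiv (bl * r) n
      = PySem.Int.floordiv (bl * (PySem.Int.mod (PySem.Int.mod bl n * r) n)) n)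
    ↔ PySem.Int.mod bl n = 1 := by
  have hn0 : (0:Int) < n := by omega
  have hrr : PySem.Int.mod r n = r := by
    rw [PySem.Int.mod_eq_emod_of_pos hn0, Int.emod_eq_of_lt (by omega) hrn]
  constructor
  · intro h
    set g := PySem.Int.mod bl n with hg
    set gr := PySem.Int.mod (g * r) n with hgr
    have hg0 : 0 ≤ g := PySem.Int.mod_nonneg _ hn0
    have hgn : g < n := PySem.Int.mod_lt _ hn0
    have hgr0 : 0 ≤ gr := PySem.Int.mod_nonneg _ hn0
    have hgrn : gr < n := PySem.Int.mod_lt _ hn0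
    rw [PySem.Int.floordiv_eq_ediv_of_pos hn0, PySem.Int.floordiv_eq_ediv_of_pos hn0] at h
    -- step 1: the equal floors force gr = r (since bl ≥ n, a shift of r by 1 shifts the floor)
    have hgrr : gr = r := by
      by_contra hne
      have hsub : ∀ a : Int, (a - n) / n = a / n - 1 := by
        intro a
        have h1 := Int.add_mul_ediv_right a (-1) (by omega : n ≠ 0)
        rw [show a + -1 * n = a - n from by ring] at h1
        omega
      rcases lt_or_gt_of_ne hne with hlt | hgt
      · have h1 : bl * gr ≤ bl * r - n := by nlinarith
        have h2 : bl * gr / n ≤ (bl * r - n) / n := Int.ediv_le_ediv hn0 h1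
        rw [hsub] at h2
        omega
      · have h1 : bl * r ≤ bl * gr - n := by nlinarith
        have h2 : bl * r / n ≤ (bl * gr - n) / n := Int.ediv_le_ediv hn0 h1
        rw [hsub] at h2
        omega
    -- step 2: gr = r and gcd(r, n) = 1 force g = 1
    have hdvd : n ∣ (g - 1) * r := by
      have : (g * r) % n = r % n := by
        rw [← PySem.Int.mod_eq_emod_of_pos hn0, ← PySem.Int.mod_eq_emod_of_pos hn0,
          ← hgr, hgrr, hrr]
      have h0 : (g * r - r) % n = 0 := Int.emod_eq_emod_iff_emod_sub_eq_zero.mp this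
      have h1 : n ∣ g * r - r := Int.dvd_of_emod_eq_zero h0
      have h2 : g * r - r = (g - 1) * r := by ring
      rwa [h2] at h1
    have hcop : IsCoprime n r := by
      rw [Int.isCoprime_iff_gcd_eq_one, Int.gcd_comm]
      exact hco
    have hdg : n ∣ g - 1 := hcop.dvd_of_dvd_mul_right hdvd
    obtain ⟨k, hk⟩ := hdg
    have hk0 : k = 0 := by
      by_contra hkne
      rcases lt_or_gt_of_ne hkne with hneg | hpos
      · nlinarith
      · nlinarith
    rw [hk0, mul_zero] at hk
    omega
  · intro h
    rw [h, one_mul, hrr]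

theorem collision_at_lag_eq (n ell : Int) (hn : 1 < n) :
    collision_at_lag n ell = collision_at_lag_alt n ell := by
  have hn0 : (0:Int) < n := by omega
  have hbl0 : (0:Int) < 10 ^ ell.toNat := pow_pos (by norm_num) _
  simp only [collision_at_lag, collision_at_lag_alt, PySem.Int.powMod_eq,
    if_neg (show ¬ n ≤ 1 by omega)]
  by_cases hcap : pvCap n ell.toNat < n
  · -- b^ell < n : both take the explicit loop, with the same body
    have hce : pvCap n ell.toNat = 10 ^ ell.toNat := pvCap_eq_of_lt n ell.toNat hcap
    rw [if_neg (by omega : ¬ pvCap n ell.toNat ≥ n), hce,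
      if_pos (show (10:Int) ^ ell.toNat ≤ n by omega)]
    congr 1
    apply PySem.List.foldl_congr_mem
    intro acc r _
    by_cases h1 : Int.gcd r n = 1 <;> simp [h1]
  · -- b^ell ≥ n : A's loop collapses to the closed form B computes
    have hcap' : n ≤ pvCap n ell.toNat := by omega
    have hble : n ≤ 10 ^ ell.toNat := le_trans hcap' (pvCap_le n hn ell.toNat)
    rw [if_pos (show pvCap n ell.toNat ≥ n from hcap')]
    have hQ : (if (10:Int) ^ ell.toNat ≤ n then PySem.Int.floordiv (n - 1) (10 ^ ell.toNat) else 0) = 0 := by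
      by_cases hb : (10:Int) ^ ell.toNat ≤ n
      · rw [if_pos hb, PySem.Int.floordiv_eq_ediv_of_pos hbl0]
        exact Int.ediv_eq_zero_of_lt (by omega) (by omega)
      · rw [if_neg hb]
    rw [hQ, sub_zero]
    by_cases hg : PySem.Int.mod (10 ^ ell.toNat) n = 1
    · rw [if_neg (by simp [hg])]
      rw [PySem.List.foldl_congr_mem _ _
          (fun (C : Int) (r : Int) => if Int.gcd r n = 1 then C + 1 else C) _
          (by
            intro acc r hr
            rw [PySem.List.mem_pyRange_one] at hr
            by_cases h1 : Int.gcd r n = 1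
            · have hc := (pvCollide_iff n (10 ^ ell.toNat) r hn hble hr.1 hr.2 h1).mpr hg
              simp [h1, hc]
            · simp [h1])]
      rw [PySem.List.foldl_ite_add_one (fun r => Int.gcd r n = 1), zero_add,
        List.countP_eq_length_filter]
      congr 1
    · rw [if_pos (by simp [hg])]
      rw [PySem.List.foldl_congr_mem _ _ (fun (C : Int) (_ : Int) => C) _
          (by
            intro acc r hr
            rw [PySem.List.mem_pyRange_one] at hr
            by_cases h1 : Int.gcd r n = 1
            · have hc : ¬ (PySem.Int.floordiv (10 ^ ell.toNat * r) n
                  = PySem.Int.floordiv (10 ^ ell.toNat * (PySem.Int.mod (PySem.Int.mod (10 ^ ell.toNat) n * r) n)) n) :=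
                fun hcc => hg ((pvCollide_iff n (10 ^ ell.toNat) r hn hble hr.1 hr.2 h1).mp hcc)
              simp [h1, hc]
            · simp [h1]),
        PySem.List.foldl_ignore]

-- ===== VERDICT (by name: the statement is the Claim_ definition above) =====
theorem collision_at_lag_spec : Claim_equal_collision_at_lag := by
  intro n ell _ _hpre
  unfold Spec_collision_at_lag
  by_cases hn : n ≤ 1
  · simp [collision_at_lag, collision_at_lag_alt, if_pos hn]
  · exact collision_at_lag_eq n ell (by omega)
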